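-- pv_equiv track=rewrite | github.com/billy1kaplan/AdventofCode | 2017/src/day4.py | is_valid
-- ===== SOURCE A (Python) =====
-- def is_valid(words):
--     for i in range(0, len(words)):
--         for j in range(i, len(words)):
--             if i == j:
--                 continue
--             if words[i] == words[j]:
--                 return False
--     return True
-- ===== SOURCE B (Python) =====
-- def is_valid(words):
--     s = sorted(words)
--     return all(a != b for a, b in zip(s, s[1:]))
-- ===== Notes on version B (the rewrite author's own statement) =====
-- stated objective: alternative
-- what changed: Replaces the nested all-pairs index scan with a sort followed by a single adjacent-compare pass over zip(s, s[1:]).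
import Mathlib
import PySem

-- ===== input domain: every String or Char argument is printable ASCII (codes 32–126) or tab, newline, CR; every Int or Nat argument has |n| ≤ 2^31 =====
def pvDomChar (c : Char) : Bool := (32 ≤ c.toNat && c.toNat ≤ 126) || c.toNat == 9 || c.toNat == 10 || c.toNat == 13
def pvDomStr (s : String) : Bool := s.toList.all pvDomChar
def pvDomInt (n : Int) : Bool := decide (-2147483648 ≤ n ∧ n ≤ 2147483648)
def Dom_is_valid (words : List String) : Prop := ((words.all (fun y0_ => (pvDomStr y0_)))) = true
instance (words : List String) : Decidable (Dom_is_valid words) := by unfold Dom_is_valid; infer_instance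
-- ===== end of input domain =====

-- B replaces A's all-pairs index scan with sort-then-adjacent-compare (objective: alternative algorithm, O(n log n) scan vs O(n^2) pairs; not measured faster since A returns early on duplicates).

-- ===== PORT A =====
def is_valid (words : List String) : Bool :=
  (PySem.List.pyRange 0 (PySem.List.len words) 1).all (fun i =>
    (PySem.List.pyRange i (PySem.List.len words) 1).all (fun j =>
      if i == j then true
      else !(PySem.List.pyGetD words i "" == PySem.List.pyGetD words j "")))

-- ===== PORT B =====
def is_valid_alt (words : List String) : Bool :=
  let s := PySem.List.sorted words (fun x => x) false
  (s.zip (PySem.List.slice s (some 1) none)).all (fun p => !(p.1 == p.2))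

-- ===== PRECONDITION & SPEC =====
def Spec_is_valid (words : List String) (out : Bool) : Prop := out = is_valid_alt words
instance (words : List String) (out : Bool) : Decidable (Spec_is_valid words out) := by unfold Spec_is_valid; infer_instance

-- ===== CLAIM (what is proved, stated in full; the proofs are below) =====
def Claim_equal_is_valid : Prop := ∀ (words : List String), Dom_is_valid words → Spec_is_valid words (is_valid words)

-- ===== LEMMAS AND PROOFS =====

-- A returns True exactly when no two distinct positions hold equal words.
theorem is_valid_eq_true_iff (words : List String) :
    is_valid words = true ↔ words.Pairwise (· ≠ ·) := by
  unfold is_valid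
  rw [List.pairwise_iff_getElem]
  simp only [List.all_eq_true, PySem.List.mem_pyRange_one, PySem.List.len_eq,
    beq_iff_eq, and_imp]
  constructor
  · intro h i j hi hj hij
    have := h i (by omega) (by omega) j (by omega) (by omega)
    rw [if_neg (by simp; omega)] at this
    rw [PySem.List.pyGetD_eq_getElem words "" (by omega) (by exact_mod_cast hi),
        PySem.List.pyGetD_eq_getElem words "" (by omega) (by exact_mod_cast hj)] at this
    simpa using this
  · intro h i hi hin j hij hjn
    by_cases hij' : i = j
    · simp [hij']
    · rw [if_neg (by simpa using hij')]
      rw [PySem.List.pyGetD_eq_getElem words "" hi hin,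
          PySem.List.pyGetD_eq_getElem words "" (by omega) hjn]
      have := h i.toNat j.toNat (by omega) (by omega) (by omega)
      simpa using this

-- the adjacent-pair scan is exactly an IsChain (· ≠ ·) check
theorem zip_tail_all_ne_iff (s : List String) :
    (s.zip s.tail).all (fun p => !(p.1 == p.2)) = true ↔ s.IsChain (· ≠ ·) := by
  induction s with
  | nil => simp
  | cons a t ih =>
    cases t with
    | nil => simp
    | cons b u =>
      rw [List.isChain_cons_cons]
      simp_all

-- combining two chains pointwise
theorem isChain_and {α : Type} {r s : α → α → Prop} {l : List α}
    (h1 : l.IsChain r) (h2 : l.IsChain s) : l.IsChain (fun a b => r a b ∧ s a b) := by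
  induction l with
  | nil => simp
  | cons a t ih =>
    cases t with
    | nil => simp
    | cons b u =>
      rw [List.isChain_cons_cons] at *
      exact ⟨⟨h1.1, h2.1⟩, ih h1.2 h2.2⟩

-- on a ≤-sorted list, adjacent-distinct is the same as fully duplicate-free
theorem isChain_ne_iff_pairwise_ne_of_sorted (s : List String)
    (hs : s.Pairwise (· ≤ ·)) : s.IsChain (· ≠ ·) ↔ s.Pairwise (· ≠ ·) := by
  constructor
  · intro h1
    have hc : s.IsChain (· < ·) :=
      (isChain_and h1 hs.isChain).imp (fun _ _ h => lt_of_le_of_ne h.2 h.1)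
    exact (List.isChain_iff_pairwise.mp hc).imp (fun h => ne_of_lt h)
  · intro h
    exact h.isChain

theorem is_valid_alt_eq_true_iff (words : List String) :
    is_valid_alt words = true ↔ words.Pairwise (· ≠ ·) := by
  have hdef : is_valid_alt words =
      ((PySem.List.sorted words (fun x => x) false).zip
        (PySem.List.slice (PySem.List.sorted words (fun x => x) false) (some 1) none)).all
        (fun p => !(p.1 == p.2)) := rfl
  rw [hdef, PySem.List.slice_from_one, zip_tail_all_ne_iff,
    isChain_ne_iff_pairwise_ne_of_sorted _
      (by simpa using PySem.List.sorted_pairwise words (fun x => x) )]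
  have hperm : (PySem.List.sorted words (fun x => x) false).Perm words :=
    PySem.List.sorted_perm words (fun x => x) false
  exact hperm.nodup_iff

-- ===== VERDICT (by name: the statement is the Claim_ definition above) =====
theorem is_valid_spec : Claim_equal_is_valid := by
  intro words _
  unfold Spec_is_valid
  rw [Bool.eq_iff_iff, is_valid_eq_true_iff, is_valid_alt_eq_true_iff]
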